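-- pv_equiv track=rewrite | github.com/ptobiasdiaz/multiemu | tests/fallbacks/cpc_render_reference.py | compose_display_row
-- ===== SOURCE A (Python) =====
-- def compose_display_row(
--     row_bytes: list[int],
--     horizontal_map: list[int],
--     raster_origin_x: int,
--     frame_width: int,
--     border_rgb: tuple[int, int, int],
--     mode: int,
--     pen_rgb_map: list[tuple[int, int, int]],
-- ) -> list[tuple[int, int, int]]:
--     row = [border_rgb] * max(0, frame_width)
--     if not row_bytes or not horizontal_map or frame_width <= 0:
--         return row
--
--     if mode == 0:
--         pixels_per_byte = 2
--     elif mode == 2: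
--         pixels_per_byte = 8
--     else:
--         pixels_per_byte = 4
--
--     for dst_x in range(frame_width):
--         raster_x = dst_x - raster_origin_x
--         display_pixel = horizontal_map[raster_x] if 0 <= raster_x < len(horizontal_map) else -1
--         if display_pixel < 0:
--             continue
--
--         byte_index = display_pixel // pixels_per_byte
--         if not (0 <= byte_index < len(row_bytes)):
--             continue
--
--         value = row_bytes[byte_index]
--         pixel_index = display_pixel % pixels_per_byte
--
--         if mode == 0:
--             if pixel_index == 0:
--                 pen = ((value >> 7) & 1) | (((value >> 3) & 1) << 1) | (((value >> 5) & 1) << 2) | (((value >> 1) & 1) << 3)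
--             else:
--                 pen = ((value >> 6) & 1) | (((value >> 2) & 1) << 1) | (((value >> 4) & 1) << 2) | ((value & 1) << 3)
--         elif mode == 2:
--             pen = (value >> (7 - pixel_index)) & 1
--         else:
--             if pixel_index == 0:
--                 pen = (((value >> 7) & 1) << 1) | ((value >> 3) & 1)
--             elif pixel_index == 1:
--                 pen = (((value >> 6) & 1) << 1) | ((value >> 2) & 1)
--             elif pixel_index == 2:
--                 pen = (((value >> 5) & 1) << 1) | ((value >> 1) & 1)
--             else:
--                 pen = (((value >> 4) & 1) << 1) | (value & 1)
--
--         row[dst_x] = pen_rgb_map[pen & 0x0F]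
--
--     return row
-- ===== SOURCE B (Python) =====
-- def compose_display_row(
--     row_bytes,
--     horizontal_map,
--     raster_origin_x,
--     frame_width,
--     border_rgb,
--     mode,
--     pen_rgb_map,
-- ):
--     row = [border_rgb] * max(0, frame_width)
--     if not row_bytes or not horizontal_map or frame_width <= 0:
--         return row
--
--     # pass 1: decode every byte into its pen values, flat list
--     pens = []
--     if mode == 0:
--         for v in row_bytes:
--             pens.append(((v >> 7) & 1) | (((v >> 3) & 1) << 1) | (((v >> 5) & 1) << 2) | (((v >> 1) & 1) << 3))
--             pens.append(((v >> 6) & 1) | (((v >> 2) & 1) << 1) | (((v >> 4) & 1) << 2) | ((v & 1) << 3))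
--     elif mode == 2:
--         for v in row_bytes:
--             for k in range(8):
--                 pens.append((v >> (7 - k)) & 1)
--     else:
--         for v in row_bytes:
--             for k in range(4):
--                 pens.append((((v >> (7 - k)) & 1) << 1) | ((v >> (3 - k)) & 1))
--
--     # pass 2: place decoded pixels through the horizontal map
--     n = len(pens)
--     hlen = len(horizontal_map)
--     for dst_x in range(frame_width):
--         raster_x = dst_x - raster_origin_x
--         if 0 <= raster_x < hlen:
--             dp = horizontal_map[raster_x]
--             if 0 <= dp < n:
--                 row[dst_x] = pen_rgb_map[pens[dp] & 0x0F]
--     return row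
-- ===== Notes on version B (the rewrite author's own statement) =====
-- stated objective: alternative
-- what changed: A decodes the mode-specific pen bits inline for every destination pixel in one fused loop; B first decodes every byte once into a flat pen-per-pixel list and then runs a separate placement pass over the frame that only looks pens up.
import Mathlib
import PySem

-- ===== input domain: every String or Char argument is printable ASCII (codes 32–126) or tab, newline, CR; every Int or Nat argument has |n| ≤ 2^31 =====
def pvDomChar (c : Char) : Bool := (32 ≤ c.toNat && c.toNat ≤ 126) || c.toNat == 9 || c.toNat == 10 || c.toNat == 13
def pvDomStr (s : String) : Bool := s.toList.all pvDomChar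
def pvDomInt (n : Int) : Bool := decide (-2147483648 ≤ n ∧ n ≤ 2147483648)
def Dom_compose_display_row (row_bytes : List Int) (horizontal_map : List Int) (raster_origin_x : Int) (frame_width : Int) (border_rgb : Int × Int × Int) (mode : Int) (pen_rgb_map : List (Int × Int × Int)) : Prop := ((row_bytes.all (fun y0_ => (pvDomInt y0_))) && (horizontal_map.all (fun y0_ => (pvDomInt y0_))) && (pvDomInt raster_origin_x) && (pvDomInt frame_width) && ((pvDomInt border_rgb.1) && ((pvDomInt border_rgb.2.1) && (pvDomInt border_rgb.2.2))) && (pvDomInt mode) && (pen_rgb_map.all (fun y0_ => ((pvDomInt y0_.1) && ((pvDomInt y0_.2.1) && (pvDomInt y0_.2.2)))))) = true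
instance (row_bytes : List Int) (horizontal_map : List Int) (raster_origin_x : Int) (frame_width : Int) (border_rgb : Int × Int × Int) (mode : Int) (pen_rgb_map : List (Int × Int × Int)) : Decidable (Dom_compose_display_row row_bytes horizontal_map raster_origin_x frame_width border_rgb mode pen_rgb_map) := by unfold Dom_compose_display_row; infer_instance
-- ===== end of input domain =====

-- B replaces A's fused per-destination-pixel decode with two passes (decode every byte once into a
-- flat pen list, then place pixels through the horizontal map); same return value on Pre_.

-- ===== PORT A =====
def compose_display_row (row_bytes : List Int) (horizontal_map : List Int) (raster_origin_x : Int) (frame_width : Int) (border_rgb : Int × Int × Int) (mode : Int) (pen_rgb_map : List (Int × Int × Int)) : List (Int × Int × Int) :=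
  let row := List.replicate (max 0 frame_width).toNat border_rgb
  if row_bytes = [] ∨ horizontal_map = [] ∨ frame_width ≤ 0 then row
  else
    let ppb : Int := if mode = 0 then 2 else if mode = 2 then 8 else 4
    (PySem.List.pyRange 0 frame_width 1).foldl (fun row dst_x =>
      let raster_x := dst_x - raster_origin_x
      let display_pixel := if 0 ≤ raster_x ∧ raster_x < PySem.List.len horizontal_map
                           then PySem.List.pyGetD horizontal_map raster_x (-1) else -1
      if display_pixel < 0 then row
      else
        let byte_index := PySem.Int.floordiv display_pixel ppb
        if ¬ (0 ≤ byte_index ∧ byte_index < PySem.List.len row_bytes) then row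
        else
          let value := PySem.List.pyGetD row_bytes byte_index 0
          let pixel_index := PySem.Int.mod display_pixel ppb
          let pen : Int :=
            if mode = 0 then
              if pixel_index = 0 then
                PySem.Int.bor (PySem.Int.bor (PySem.Int.bor (PySem.Int.band (value >>> (7:Nat)) 1) (PySem.Int.band (value >>> (3:Nat)) 1 <<< (1:Nat))) (PySem.Int.band (value >>> (5:Nat)) 1 <<< (2:Nat))) (PySem.Int.band (value >>> (1:Nat)) 1 <<< (3:Nat))
              else
                PySem.Int.bor (PySem.Int.bor (PySem.Int.bor (PySem.Int.band (value >>> (6:Nat)) 1) (PySem.Int.band (value >>> (2:Nat)) 1 <<< (1:Nat))) (PySem.Int.band (value >>> (4:Nat)) 1 <<< (2:Nat))) (PySem.Int.band value 1 <<< (3:Nat))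
            else if mode = 2 then
              PySem.Int.band (value >>> (7 - pixel_index).toNat) 1
            else
              if pixel_index = 0 then
                PySem.Int.bor (PySem.Int.band (value >>> (7:Nat)) 1 <<< (1:Nat)) (PySem.Int.band (value >>> (3:Nat)) 1)
              else if pixel_index = 1 then
                PySem.Int.bor (PySem.Int.band (value >>> (6:Nat)) 1 <<< (1:Nat)) (PySem.Int.band (value >>> (2:Nat)) 1)
              else if pixel_index = 2 then
                PySem.Int.bor (PySem.Int.band (value >>> (5:Nat)) 1 <<< (1:Nat)) (PySem.Int.band (value >>> (1:Nat)) 1)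
              else
                PySem.Int.bor (PySem.Int.band (value >>> (4:Nat)) 1 <<< (1:Nat)) (PySem.Int.band value 1)
          PySem.List.pySetD row dst_x (PySem.List.pyGetD pen_rgb_map (PySem.Int.band pen 15) border_rgb)) row

-- ===== PORT B =====
-- decode of one byte into its pens (the body of Source B's first pass, one byte's appends)
def pvDecode (mode v : Int) : List Int :=
  if mode = 0 then
    [PySem.Int.bor (PySem.Int.bor (PySem.Int.bor (PySem.Int.band (v >>> (7:Nat)) 1) (PySem.Int.band (v >>> (3:Nat)) 1 <<< (1:Nat))) (PySem.Int.band (v >>> (5:Nat)) 1 <<< (2:Nat))) (PySem.Int.band (v >>> (1:Nat)) 1 <<< (3:Nat)),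
     PySem.Int.bor (PySem.Int.bor (PySem.Int.bor (PySem.Int.band (v >>> (6:Nat)) 1) (PySem.Int.band (v >>> (2:Nat)) 1 <<< (1:Nat))) (PySem.Int.band (v >>> (4:Nat)) 1 <<< (2:Nat))) (PySem.Int.band v 1 <<< (3:Nat))]
  else if mode = 2 then
    (PySem.List.pyRange 0 8 1).map (fun (k : Int) => PySem.Int.band (v >>> (7 - k).toNat) 1)
  else
    (PySem.List.pyRange 0 4 1).map (fun (k : Int) => PySem.Int.bor (PySem.Int.band (v >>> (7 - k).toNat) 1 <<< (1:Nat)) (PySem.Int.band (v >>> (3 - k).toNat) 1))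

def compose_display_row_alt (row_bytes : List Int) (horizontal_map : List Int) (raster_origin_x : Int) (frame_width : Int) (border_rgb : Int × Int × Int) (mode : Int) (pen_rgb_map : List (Int × Int × Int)) : List (Int × Int × Int) :=
  let row := List.replicate (max 0 frame_width).toNat border_rgb
  if row_bytes = [] ∨ horizontal_map = [] ∨ frame_width ≤ 0 then row
  else
    -- pass 1: decode every byte into its pen values, flat list
    let pens := row_bytes.foldl (fun acc v => acc ++ pvDecode mode v) []
    -- pass 2: place decoded pixels through the horizontal map
    let n := PySem.List.len pens
    let hlen := PySem.List.len horizontal_map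
    (PySem.List.pyRange 0 frame_width 1).foldl (fun row dst_x =>
      let raster_x := dst_x - raster_origin_x
      if 0 ≤ raster_x ∧ raster_x < hlen then
        let dp := PySem.List.pyGetD horizontal_map raster_x (-1)
        if 0 ≤ dp ∧ dp < n then
          PySem.List.pySetD row dst_x (PySem.List.pyGetD pen_rgb_map (PySem.Int.band (PySem.List.pyGetD pens dp 0) 15) border_rgb)
        else row
      else row) row

-- ===== PRECONDITION & SPEC =====
-- helpers used only by Pre_ (pointwise arithmetic, not the ports)
def pvPpbI (mode : Int) : Int := if mode = 0 then 2 else if mode = 2 then 8 else 4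

def pvPenOf (mode v pixel_index : Int) : Int :=
  if mode = 0 then
    if pixel_index = 0 then
      PySem.Int.bor (PySem.Int.bor (PySem.Int.bor (PySem.Int.band (v >>> (7:Nat)) 1) (PySem.Int.band (v >>> (3:Nat)) 1 <<< (1:Nat))) (PySem.Int.band (v >>> (5:Nat)) 1 <<< (2:Nat))) (PySem.Int.band (v >>> (1:Nat)) 1 <<< (3:Nat))
    else
      PySem.Int.bor (PySem.Int.bor (PySem.Int.bor (PySem.Int.band (v >>> (6:Nat)) 1) (PySem.Int.band (v >>> (2:Nat)) 1 <<< (1:Nat))) (PySem.Int.band (v >>> (4:Nat)) 1 <<< (2:Nat))) (PySem.Int.band v 1 <<< (3:Nat))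
  else if mode = 2 then
    PySem.Int.band (v >>> (7 - pixel_index).toNat) 1
  else
    if pixel_index = 0 then
      PySem.Int.bor (PySem.Int.band (v >>> (7:Nat)) 1 <<< (1:Nat)) (PySem.Int.band (v >>> (3:Nat)) 1)
    else if pixel_index = 1 then
      PySem.Int.bor (PySem.Int.band (v >>> (6:Nat)) 1 <<< (1:Nat)) (PySem.Int.band (v >>> (2:Nat)) 1)
    else if pixel_index = 2 then
      PySem.Int.bor (PySem.Int.band (v >>> (5:Nat)) 1 <<< (1:Nat)) (PySem.Int.band (v >>> (1:Nat)) 1)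
    else
      PySem.Int.bor (PySem.Int.band (v >>> (4:Nat)) 1 <<< (1:Nat)) (PySem.Int.band v 1)

-- Pre_ excludes exactly the inputs on which A raises IndexError on pen_rgb_map[pen & 0x0F]
-- (some actually written pixel's decoded pen index reaches past pen_rgb_map); B raises the same
-- IndexError on the same lookup there, so no returning input of A is excluded.
def Pre_compose_display_row (row_bytes : List Int) (horizontal_map : List Int) (raster_origin_x : Int) (frame_width : Int) (border_rgb : Int × Int × Int) (mode : Int) (pen_rgb_map : List (Int × Int × Int)) : Prop :=
  row_bytes = [] ∨ horizontal_map = [] ∨ frame_width ≤ 0 ∨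
    (∀ j, j < horizontal_map.length →
      (0 ≤ (j : Int) + raster_origin_x ∧ (j : Int) + raster_origin_x < frame_width) →
      (0 ≤ horizontal_map.getD j 0 ∧
         horizontal_map.getD j 0 < (row_bytes.length : Int) * pvPpbI mode) →
      PySem.Int.band
        (pvPenOf mode
          (row_bytes.getD (PySem.Int.floordiv (horizontal_map.getD j 0) (pvPpbI mode)).toNat 0)
          (PySem.Int.mod (horizontal_map.getD j 0) (pvPpbI mode))) 15
        < (pen_rgb_map.length : Int))
instance (row_bytes : List Int) (horizontal_map : List Int) (raster_origin_x : Int) (frame_width : Int) (border_rgb : Int × Int × Int) (mode : Int) (pen_rgb_map : List (Int × Int × Int)) : Decidable (Pre_compose_display_row row_bytes horizontal_map raster_origin_x frame_width border_rgb mode pen_rgb_map) := by unfold Pre_compose_display_row; infer_instance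

def pvWitness_compose_display_row : List Int × List Int × Int × Int × (Int × Int × Int) × Int × (List (Int × Int × Int)) :=
  ([170, 85], [0, 1, 2, 3], 1, 6, (1, 2, 3), 2, [(0, 0, 0), (255, 255, 255)])

def Spec_compose_display_row (row_bytes : List Int) (horizontal_map : List Int) (raster_origin_x : Int) (frame_width : Int) (border_rgb : Int × Int × Int) (mode : Int) (pen_rgb_map : List (Int × Int × Int)) (out : List (Int × Int × Int)) : Prop := out = compose_display_row_alt row_bytes horizontal_map raster_origin_x frame_width border_rgb mode pen_rgb_map
instance (row_bytes : List Int) (horizontal_map : List Int) (raster_origin_x : Int) (frame_width : Int) (border_rgb : Int × Int × Int) (mode : Int) (pen_rgb_map : List (Int × Int × Int)) (out : List (Int × Int × Int)) : Decidable (Spec_compose_display_row row_bytes horizontal_map raster_origin_x frame_width border_rgb mode pen_rgb_map out) := by unfold Spec_compose_display_row; infer_instance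

-- ===== CLAIM (what is proved, stated in full; the proofs are below) =====
def Claim_equal_compose_display_row : Prop := ∀ (row_bytes : List Int) (horizontal_map : List Int) (raster_origin_x : Int) (frame_width : Int) (border_rgb : Int × Int × Int) (mode : Int) (pen_rgb_map : List (Int × Int × Int)), Dom_compose_display_row row_bytes horizontal_map raster_origin_x frame_width border_rgb mode pen_rgb_map → Pre_compose_display_row row_bytes horizontal_map raster_origin_x frame_width border_rgb mode pen_rgb_map → Spec_compose_display_row row_bytes horizontal_map raster_origin_x frame_width border_rgb mode pen_rgb_map (compose_display_row row_bytes horizontal_map raster_origin_x frame_width border_rgb mode pen_rgb_map)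

-- ===== LEMMAS AND PROOFS =====

-- pixels per byte, Nat form
def pvPpb (mode : Int) : Nat := if mode = 0 then 2 else if mode = 2 then 8 else 4

theorem pvPpb_pos (mode : Int) : 0 < pvPpb mode := by
  unfold pvPpb; split_ifs <;> norm_num

theorem pvDecode_length (mode v : Int) : (pvDecode mode v).length = pvPpb mode := by
  unfold pvDecode pvPpb
  split_ifs <;> simp [PySem.List.length_pyRange_one]

-- indexing a flat list built from fixed-size blocks
theorem pvFlat_get (mode : Int) (xs : List Int) (m : Nat) (hm : m < xs.length * pvPpb mode) :
    (xs.flatMap (pvDecode mode))[m]? = (pvDecode mode (xs.getD (m / pvPpb mode) 0))[m % pvPpb mode]? := by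
  induction xs generalizing m with
  | nil => simp at hm
  | cons x t ih =>
    by_cases h : m < pvPpb mode
    · rw [List.flatMap_cons, List.getElem?_append_left (by rw [pvDecode_length]; exact h)]
      rw [Nat.div_eq_of_lt h, Nat.mod_eq_of_lt h]
      simp
    · push_neg at h
      obtain ⟨m', rfl⟩ : ∃ m', m = pvPpb mode + m' := ⟨m - pvPpb mode, by omega⟩
      rw [List.flatMap_cons, List.getElem?_append_right (by rw [pvDecode_length]; omega)]
      rw [pvDecode_length, Nat.add_sub_cancel_left]
      rw [ih m' (by simp [List.length_cons] at hm; have := pvPpb_pos mode; nlinarith)]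
      rw [Nat.add_div_left _ (pvPpb_pos mode), Nat.add_mod_left]
      simp [Nat.add_comm]


theorem pvPens_length (mode : Int) (xs : List Int) :
    (xs.flatMap (pvDecode mode)).length = xs.length * pvPpb mode := by
  induction xs with
  | nil => simp
  | cons x t ih => simp [List.flatMap_cons, pvDecode_length, ih, Nat.succ_mul, Nat.add_comm]

theorem pvRange8 : PySem.List.pyRange 0 8 1 = [0, 1, 2, 3, 4, 5, 6, 7] := by decide

theorem pvRange4 : PySem.List.pyRange 0 4 1 = [0, 1, 2, 3] := by decide

-- the decoded pen at pixel k of a byte equals A's inline pen expression at pixel_index = k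
theorem pvDecode_getD (mode v : Int) (k : Nat) (hk : k < pvPpb mode) :
    (pvDecode mode v).getD k 0 =
      (if mode = 0 then
        if (k : Int) = 0 then
          PySem.Int.bor (PySem.Int.bor (PySem.Int.bor (PySem.Int.band (v >>> (7:Nat)) 1) (PySem.Int.band (v >>> (3:Nat)) 1 <<< (1:Nat))) (PySem.Int.band (v >>> (5:Nat)) 1 <<< (2:Nat))) (PySem.Int.band (v >>> (1:Nat)) 1 <<< (3:Nat))
        else
          PySem.Int.bor (PySem.Int.bor (PySem.Int.bor (PySem.Int.band (v >>> (6:Nat)) 1) (PySem.Int.band (v >>> (2:Nat)) 1 <<< (1:Nat))) (PySem.Int.band (v >>> (4:Nat)) 1 <<< (2:Nat))) (PySem.Int.band v 1 <<< (3:Nat))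
      else if mode = 2 then
        PySem.Int.band (v >>> ((7:Int) - (k : Int)).toNat) 1
      else
        if (k : Int) = 0 then
          PySem.Int.bor (PySem.Int.band (v >>> (7:Nat)) 1 <<< (1:Nat)) (PySem.Int.band (v >>> (3:Nat)) 1)
        else if (k : Int) = 1 then
          PySem.Int.bor (PySem.Int.band (v >>> (6:Nat)) 1 <<< (1:Nat)) (PySem.Int.band (v >>> (2:Nat)) 1)
        else if (k : Int) = 2 then
          PySem.Int.bor (PySem.Int.band (v >>> (5:Nat)) 1 <<< (1:Nat)) (PySem.Int.band (v >>> (1:Nat)) 1)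
        else
          PySem.Int.bor (PySem.Int.band (v >>> (4:Nat)) 1 <<< (1:Nat)) (PySem.Int.band v 1)) := by
  unfold pvPpb at hk
  unfold pvDecode
  by_cases h0 : mode = 0
  · simp only [if_pos h0] at hk ⊢
    interval_cases k <;> norm_num
  · by_cases h2 : mode = 2
    · simp only [if_neg h0, if_pos h2] at hk ⊢
      interval_cases k <;> simp [pvRange8]
    · simp only [if_neg h0, if_neg h2] at hk ⊢
      interval_cases k <;> simp [pvRange4]

-- ===== VERDICT (by name: the statement is the Claim_ definition above) =====
theorem compose_display_row_spec : Claim_equal_compose_display_row := by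
  intro row_bytes horizontal_map raster_origin_x frame_width border_rgb mode pen_rgb_map _ _
  unfold Spec_compose_display_row compose_display_row compose_display_row_alt
  by_cases hg : row_bytes = [] ∨ horizontal_map = [] ∨ frame_width ≤ 0
  · simp only [if_pos hg]
  · simp only [if_neg hg]
    rw [PySem.List.foldl_append_eq_flatMap, List.nil_append]
    congr 1
    funext row dst_x
    by_cases hin : 0 ≤ dst_x - raster_origin_x ∧ dst_x - raster_origin_x < PySem.List.len horizontal_map
    case neg =>
      simp only [if_neg hin]
      norm_num
    case pos =>
      simp only [if_pos hin]
      set dp := PySem.List.pyGetD horizontal_map (dst_x - raster_origin_x) (-1) with hdpdef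
      by_cases hneg : dp < 0
      · rw [if_pos hneg, if_neg (by omega)]
      · push_neg at hneg
        rw [if_neg (by omega)]
        have hppb : (if mode = 0 then (2:Int) else if mode = 2 then 8 else 4) = ((pvPpb mode : Nat) : Int) := by
          unfold pvPpb; split_ifs <;> norm_num
        rw [hppb]
        have hmeq : ((dp.toNat : Nat) : Int) = dp := Int.toNat_of_nonneg hneg
        set m := dp.toNat with hmdef
        rw [← hmeq]
        rw [PySem.Int.floordiv_natCast, PySem.Int.mod_natCast]
        have hp := pvPpb_pos mode
        have hnlen : PySem.List.len (row_bytes.flatMap (pvDecode mode)) = ((row_bytes.length * pvPpb mode : Nat) : Int) := by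
          rw [PySem.List.len_eq, pvPens_length]
        rw [hnlen]
        by_cases hbig : m < row_bytes.length * pvPpb mode
        · have hdiv : m / pvPpb mode < row_bytes.length := by
            rw [Nat.div_lt_iff_lt_mul hp]; omega
          rw [if_neg (by
              rw [not_not, PySem.List.len_eq]
              exact ⟨by positivity, by exact_mod_cast hdiv⟩),
            if_pos (⟨by positivity, by exact_mod_cast hbig⟩ : (0:Int) ≤ ((m : Nat) : Int) ∧ ((m : Nat) : Int) < ((row_bytes.length * pvPpb mode : Nat) : Int))]
          have hpen : PySem.List.pyGetD (row_bytes.flatMap (pvDecode mode)) ((m : Nat) : Int) 0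
              = (pvDecode mode (PySem.List.pyGetD row_bytes ((m / pvPpb mode : Nat) : Int) 0)).getD (m % pvPpb mode) 0 := by
            rw [PySem.List.pyGetD_natCast, PySem.List.pyGetD_natCast]
            rw [List.getD_eq_getElem?_getD, List.getD_eq_getElem?_getD, pvFlat_get mode _ m hbig]
          rw [hpen, pvDecode_getD mode _ (m % pvPpb mode) (Nat.mod_lt _ hp)]
        · rw [if_pos (by
              rintro ⟨-, h2⟩
              rw [PySem.List.len_eq] at h2
              have h3 : m / pvPpb mode < row_bytes.length := by exact_mod_cast h2
              rw [Nat.div_lt_iff_lt_mul hp] at h3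
              omega),
            if_neg (by
              rintro ⟨-, h2⟩
              have h3 : m < row_bytes.length * pvPpb mode := by exact_mod_cast h2
              omega)]
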